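-- pv_equiv track=rewrite | github.com/Do-sensei/Coding_problem | 프로그래머스/unrated/250136. ［PCCP 기출문제］ 2번 ／ 석유 시추/［PCCP 기출문제］ 2번 ／ 석유 시추.py | solution
-- ===== SOURCE A (Python) =====
-- from collections import deque
--
-- def solution(land):
--     n, m = len(land), len(land[0])
--
--     def bfs(x, y, blob_id):
--         queue = deque([(x, y)])
--         land[x][y] = blob_id
--         size = 1
--
--         while queue:
--             cx, cy = queue.popleft()
--             for dx, dy in [(1, 0), (-1, 0), (0, 1), (0, -1)]:
--                 nx, ny = cx + dx, cy + dy
--                 if 0 <= nx < n and 0 <= ny < m and land[nx][ny] == 1: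
--                     land[nx][ny] = blob_id
--                     queue.append((nx, ny))
--                     size += 1
--
--         return size
--
--     blob_id = 2
--     blob_sizes = {}
--     for i in range(n):
--         for j in range(m):
--             if land[i][j] == 1:
--                 blob_size = bfs(i, j, blob_id)
--                 blob_sizes[blob_id] = blob_size
--                 blob_id += 1
--
--     max_oil = 0
--     for col in range(m):
--         unique_blobs = set()
--         for row in range(n):
--             if land[row][col] > 1:
--                 unique_blobs.add(land[row][col])
--
--         total_oil = sum(blob_sizes[blob] for blob in unique_blobs)
--         max_oil = max(max_oil, total_oil)
--
--     return max_oil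
-- ===== SOURCE B (Python) =====
-- def solution(land):
--     n, m = len(land), len(land[0])
--     comps = []                    # component cell-sets, in row-major first-discovery order
--     covered = set()
--     for i in range(n):
--         for j in range(m):
--             if land[i][j] != 1 or (i, j) in covered:
--                 continue
--             comp = {(i, j)}
--             for _ in range(n * m):            # enough rounds to reach the fixpoint
--                 new = set()
--                 for (x, y) in comp:
--                     for (a, b) in ((x + 1, y), (x - 1, y), (x, y + 1), (x, y - 1)):
--                         if 0 <= a < n and 0 <= b < m and land[a][b] == 1 and (a, b) not in comp:
--                             new.add((a, b))
--                 if not new: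
--                     break
--                 comp |= new
--             comps.append(comp)
--             covered |= comp
--     best = 0
--     for col in range(m):
--         total = sum(len(comp) for comp in comps if any(y == col for (_, y) in comp))
--         best = max(best, total)
--     return best
-- ===== Notes on version B (the rewrite author's own statement) =====
-- stated objective: alternative
-- what changed: A's BFS flood-fill (FIFO queue, in-place relabelling of land, dict of blob sizes, column scan of grid labels) is replaced by per-seed round-based frontier expansion to a fixpoint over the unmutated grid, keeping components as explicit cell-sets and aggregating each column over the component list; B does not mutate land (equivalence is on the return value).
-- outside the precondition, e.g. on solution([[1, 1, 0], [0, 0, 1], [3, 0, 1]]): A returns 4, B returns 2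
import Mathlib
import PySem

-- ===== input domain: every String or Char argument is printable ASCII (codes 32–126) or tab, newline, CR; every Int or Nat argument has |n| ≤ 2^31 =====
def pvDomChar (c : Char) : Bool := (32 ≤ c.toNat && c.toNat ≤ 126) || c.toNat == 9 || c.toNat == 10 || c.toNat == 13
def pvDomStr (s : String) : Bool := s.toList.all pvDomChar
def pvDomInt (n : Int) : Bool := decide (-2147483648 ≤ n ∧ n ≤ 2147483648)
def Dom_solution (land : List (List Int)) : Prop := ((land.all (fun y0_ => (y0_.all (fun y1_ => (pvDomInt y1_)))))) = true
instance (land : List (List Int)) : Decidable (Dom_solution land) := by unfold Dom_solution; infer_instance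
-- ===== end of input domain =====

-- B replaces A's BFS flood-fill (FIFO queue, in-place relabelling of `land`, dict of blob sizes) by
-- per-seed round-based frontier expansion over the unmutated grid, keeping components as sets and
-- aggregating columns over the component list.  A mutates `land` in place, B does not: the
-- equivalence proved here is about the RETURN value only.

-- ===== PORT A =====
-- land[x][y]; every read in both programs happens with 0 ≤ x < len(land), 0 ≤ y < m (and Pre_
-- guarantees m ≤ len(land[x])), where pyGetD is exactly Python's indexing.
def pvGet (g : List (List Int)) (x y : Int) : Int :=
  PySem.List.pyGetD (PySem.List.pyGetD g x []) y 0

-- land[x][y] = v (same guarded, in-range situation)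
def pvSet (g : List (List Int)) (x y v : Int) : List (List Int) :=
  PySem.List.pySetD g x (PySem.List.pySetD (PySem.List.pyGetD g x []) y v)

def pvDirs : List (Int × Int) := [(1, 0), (-1, 0), (0, 1), (0, -1)]

-- one direction probe of the BFS body: state is (land, queue, size)
def bfsDirStep (n m blob : Int) (c : Int × Int)
    (st : List (List Int) × List (Int × Int) × Int) (d : Int × Int) :
    List (List Int) × List (Int × Int) × Int :=
  let nx := c.1 + d.1
  let ny := c.2 + d.2
  if 0 ≤ nx ∧ nx < n ∧ 0 ≤ ny ∧ ny < m ∧ pvGet st.1 nx ny = 1 then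
    (pvSet st.1 nx ny blob, st.2.1 ++ [(nx, ny)], st.2.2 + 1)
  else st

-- the `while queue:` loop; the fuel n*m+1 is a totality guard only (lemma bfsLoop_spec shows the
-- queue empties before it runs out on every admitted input)
def bfsLoop (n m blob : Int) : Nat → List (List Int) → List (Int × Int) → Int → List (List Int) × Int
  | 0, g, _, size => (g, size)
  | fuel + 1, g, Q, size =>
    match Q with
    | [] => (g, size)
    | c :: rest =>
      let st := pvDirs.foldl (bfsDirStep n m blob c) (g, rest, size)
      bfsLoop n m blob fuel st.1 st.2.1 st.2.2

def pvBfs (n m : Int) (g : List (List Int)) (x y blob : Int) : List (List Int) × Int :=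
  bfsLoop n m blob (n.toNat * m.toNat + 1) (pvSet g x y blob) [(x, y)] 1

def solution (land : List (List Int)) : Int :=
  let n : Int := (land.length : Int)
  let m : Int := ((PySem.List.pyGetD land 0 []).length : Int)  -- len(land[0]); IndexError on [] is outside Pre_
  let st := (PySem.List.pyRange 0 n 1).foldl (fun st i =>
    (PySem.List.pyRange 0 m 1).foldl (fun st j =>
      if pvGet st.1 i j = 1 then
        let r := pvBfs n m st.1 i j st.2.2
        (r.1, PySem.Dict.insert st.2.1 st.2.2 r.2, st.2.2 + 1)
      else st) st) (land, (PySem.Dict.empty : PySem.Dict Int Int), (2 : Int))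
  (PySem.List.pyRange 0 m 1).foldl (fun maxOil col =>
    let uniq := (PySem.List.pyRange 0 n 1).foldl (fun u row =>
      if pvGet st.1 row col > 1 then PySem.Set.add u (pvGet st.1 row col) else u)
      (PySem.Set.empty : PySem.Set Int)
    let total := (uniq.map (fun b => PySem.Dict.getD st.2.1 b 0)).sum  -- blob_sizes[blob]: the key is always present under Pre_
    max maxOil total) 0

-- ===== PORT B =====
def pvNbrs (p : Int × Int) : List (Int × Int) :=
  [(p.1 + 1, p.2), (p.1 - 1, p.2), (p.1, p.2 + 1), (p.1, p.2 - 1)]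

-- `new = { in-range 1-neighbours of comp not yet in comp }`
def newCells (land : List (List Int)) (n m : Int) (comp : PySem.Set (Int × Int)) :
    PySem.Set (Int × Int) :=
  comp.foldl (fun s c =>
    (pvNbrs c).foldl (fun s q =>
      if 0 ≤ q.1 ∧ q.1 < n ∧ 0 ≤ q.2 ∧ q.2 < m ∧ pvGet land q.1 q.2 = 1 ∧ ¬ q ∈ comp then
        PySem.Set.add s q
      else s) s) PySem.Set.empty

-- `for _ in range(n*m): … if not new: break`
def growLoop (land : List (List Int)) (n m : Int) :
    Nat → PySem.Set (Int × Int) → PySem.Set (Int × Int)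
  | 0, comp => comp
  | fuel + 1, comp =>
    let new := newCells land n m comp
    if new.isEmpty then comp
    else growLoop land n m fuel (PySem.Set.union comp new)

def solution_alt (land : List (List Int)) : Int :=
  let n : Int := (land.length : Int)
  let m : Int := ((PySem.List.pyGetD land 0 []).length : Int)
  let st := (PySem.List.pyRange 0 n 1).foldl (fun st i =>
    (PySem.List.pyRange 0 m 1).foldl (fun st j =>
      if pvGet land i j ≠ 1 ∨ (i, j) ∈ st.2 then st
      else
        let comp := growLoop land n m (n.toNat * m.toNat) (PySem.Set.ofList [(i, j)])
        (st.1 ++ [comp], PySem.Set.union st.2 comp)) st)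
    (([] : List (PySem.Set (Int × Int))), (PySem.Set.empty : PySem.Set (Int × Int)))
  (PySem.List.pyRange 0 m 1).foldl (fun best col =>
    let total := st.1.foldl (fun t comp =>
      if comp.any (fun p => p.2 == col) then t + PySem.Set.len comp else t) 0
    max best total) 0

-- ===== PRECONDITION & SPEC =====
-- Pre_ excludes: the empty grid and grids with a row shorter than row 0 (IndexError), and grids
-- holding a cell > 1 among the first len(land[0]) entries of a row — on those A confuses the
-- pre-existing value with its own blob labels (KeyError, or a silently foreign blob size added to
-- a column's total, see claim cites).
def Pre_solution (land : List (List Int)) : Prop :=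
  land ≠ [] ∧ ∀ row ∈ land,
    (PySem.List.pyGetD land 0 []).length ≤ row.length ∧
    ∀ x ∈ row.take (PySem.List.pyGetD land 0 []).length, x ≤ 1
instance (land : List (List Int)) : Decidable (Pre_solution land) := by
  unfold Pre_solution; infer_instance

def pvWitness_solution : List (List Int) := [[1, 0, 1], [1, 0, 0], [0, 1, 1]]

def Spec_solution (land : List (List Int)) (out : Int) : Prop := out = solution_alt land
instance (land : List (List Int)) (out : Int) : Decidable (Spec_solution land out) := by
  unfold Spec_solution; infer_instance

-- ===== CLAIM (what is proved, stated in full; the proofs are below) =====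
def Claim_equal_solution : Prop :=
  ∀ (land : List (List Int)), Dom_solution land → Pre_solution land →
    Spec_solution land (solution land)

-- ===== LEMMAS AND PROOFS =====

-- ===== semantic layer (proof-only helpers) =====
def InGrid (n m : Int) (p : Int × Int) : Prop := 0 ≤ p.1 ∧ p.1 < n ∧ 0 ≤ p.2 ∧ p.2 < m

def AdjP (p q : Int × Int) : Prop :=
  q = (p.1 + 1, p.2) ∨ q = (p.1 - 1, p.2) ∨ q = (p.1, p.2 + 1) ∨ q = (p.1, p.2 - 1)

def OneC (g : List (List Int)) (n m : Int) (p : Int × Int) : Prop :=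
  InGrid n m p ∧ pvGet g p.1 p.2 = 1

def StepR (g : List (List Int)) (n m : Int) (p q : Int × Int) : Prop :=
  AdjP p q ∧ OneC g n m q

def ReachR (g : List (List Int)) (n m : Int) (s q : Int × Int) : Prop :=
  Relation.ReflTransGen (StepR g n m) s q

def gridCells (n m : Int) : Finset (Int × Int) :=
  (Finset.range n.toNat ×ˢ Finset.range m.toNat).image (fun a => ((a.1 : Int), (a.2 : Int)))

def OnesF (g : List (List Int)) (n m : Int) : Finset (Int × Int) :=
  (gridCells n m).filter (fun p => pvGet g p.1 p.2 = 1)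

noncomputable def ReachF (g : List (List Int)) (n m : Int) (s : Int × Int) : Finset (Int × Int) :=
  @Finset.filter _ (fun p => ReachR g n m s p) (fun _ => Classical.propDecidable _) (gridCells n m)

lemma mem_gridCells {n m : Int} {p : Int × Int} : p ∈ gridCells n m ↔ InGrid n m p := by
  unfold gridCells InGrid
  simp only [Finset.mem_image, Finset.mem_product, Finset.mem_range]
  constructor
  · rintro ⟨⟨a, b⟩, ⟨ha, hb⟩, rfl⟩
    refine ⟨by simp, by simp; omega, by simp, by simp; omega⟩
  · rintro ⟨h1, h2, h3, h4⟩
    refine ⟨(p.1.toNat, p.2.toNat), ⟨by omega, by omega⟩, ?_⟩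
    obtain ⟨a, b⟩ := p
    simp only [Prod.mk.injEq]
    constructor <;> [skip; skip] <;> simp <;> omega

lemma card_gridCells (n m : Int) : (gridCells n m).card = n.toNat * m.toNat := by
  unfold gridCells
  rw [Finset.card_image_of_injective]
  · simp
  · intro a b hab
    simp only [Prod.mk.injEq] at hab
    exact Prod.ext (by omega) (by omega)

lemma adjP_symm {p q : Int × Int} (h : AdjP p q) : AdjP q p := by
  unfold AdjP at *
  obtain ⟨a, b⟩ := p; obtain ⟨c, d⟩ := q
  simp only [Prod.mk.injEq] at *
  omega

lemma mem_pvNbrs {p q : Int × Int} : q ∈ pvNbrs p ↔ AdjP p q := by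
  simp [pvNbrs, AdjP]

lemma reachR_one {g : List (List Int)} {n m : Int} {s q : Int × Int}
    (h1 : OneC g n m s) (h : ReachR g n m s q) : OneC g n m q := by
  induction h with
  | refl => exact h1
  | tail _ hstep _ => exact hstep.2

lemma mem_ReachF {g : List (List Int)} {n m : Int} {s p : Int × Int} :
    p ∈ ReachF g n m s ↔ ReachR g n m s p ∧ InGrid n m p := by
  classical
  unfold ReachF
  simp only [Finset.mem_filter, mem_gridCells]
  tauto

lemma mem_ReachF_of_one {g : List (List Int)} {n m : Int} {s p : Int × Int}
    (h1 : OneC g n m s) : p ∈ ReachF g n m s ↔ ReachR g n m s p := by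
  rw [mem_ReachF]
  exact ⟨fun h => h.1, fun h => ⟨h, (reachR_one h1 h).1⟩⟩

lemma card_ReachF_le (g : List (List Int)) (n m : Int) (s : Int × Int) :
    (ReachF g n m s).card ≤ n.toNat * m.toNat := by
  classical
  calc (ReachF g n m s).card ≤ (gridCells n m).card := Finset.card_le_card (Finset.filter_subset _ _)
  _ = n.toNat * m.toNat := card_gridCells n m

lemma closed_reach_mem {g : List (List Int)} {n m : Int} {s q : Int × Int}
    (P : Int × Int → Prop) (hs : P s)
    (hcl : ∀ p q, P p → StepR g n m p q → P q) (h : ReachR g n m s q) : P q := by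
  induction h with
  | refl => exact hs
  | tail _ hstep ih => exact hcl _ _ ih hstep

lemma reach_avoids {g : List (List Int)} {n m : Int} {s q : Int × Int}
    (TP : Int × Int → Prop)
    (hclosed : ∀ p q, TP p → StepR g n m p q → TP q)
    (h1 : OneC g n m s) (hs : ¬ TP s) (hr : ReachR g n m s q) : ¬ TP q := by
  have key : ∀ q, ReachR g n m s q → ¬ TP q ∧ OneC g n m q := by
    intro q hq
    induction hq with
    | refl => exact ⟨hs, h1⟩
    | tail _ hstep ih =>
      refine ⟨?_, hstep.2⟩
      intro hT
      exact ih.1 (hclosed _ _ hT ⟨adjP_symm hstep.1, ih.2⟩)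
  exact (key q hr).1

-- indexing lemmas
lemma getD_set_eq {α : Type} (g : List α) (a : ℕ) (r : α) (k : ℕ) (d : α) :
    (g.set a r).getD k d = if a = k ∧ a < g.length then r else g.getD k d := by
  simp only [List.getD_eq_getElem?_getD, List.getElem?_set]
  split_ifs with h1 h2 h3 <;> simp_all <;> omega

lemma pvGet_nonneg {g : List (List Int)} {x y : Int} (hx : 0 ≤ x) (hy : 0 ≤ y) :
    pvGet g x y = (g.getD x.toNat []).getD y.toNat 0 := by
  simp [pvGet, PySem.List.pyGetD, PySem.List.pyGet?_of_nonneg, hx, hy,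
    List.getD_eq_getElem?_getD]

lemma pvSet_nonneg {g : List (List Int)} {x y v : Int} (hx : 0 ≤ x) (hy : 0 ≤ y) :
    pvSet g x y v = g.set x.toNat ((g.getD x.toNat []).set y.toNat v) := by
  simp [pvSet, PySem.List.pyGetD, PySem.List.pySetD_of_nonneg, PySem.List.pyGet?_of_nonneg,
    hx, hy, List.getD_eq_getElem?_getD]

lemma length_pvSet {g : List (List Int)} {x y v : Int} (hx : 0 ≤ x) (hy : 0 ≤ y) :
    (pvSet g x y v).length = g.length := by
  rw [pvSet_nonneg hx hy]; simp

lemma rows_pvSet {g : List (List Int)} {x y v : Int} (hx : 0 ≤ x) (hy : 0 ≤ y) (k : ℕ) :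
    ((pvSet g x y v).getD k []).length = (g.getD k []).length := by
  rw [pvSet_nonneg hx hy, getD_set_eq]
  split_ifs with h
  · obtain ⟨rfl, -⟩ := h; simp
  · rfl

lemma pvGet_pvSet {g : List (List Int)} {x y v : Int}
    (hx : 0 ≤ x) (hy : 0 ≤ y)
    (hxl : x.toNat < g.length) (hyl : y.toNat < (g.getD x.toNat []).length)
    (i j : Int) (hi : 0 ≤ i) (hj : 0 ≤ j) :
    pvGet (pvSet g x y v) i j = if i = x ∧ j = y then v else pvGet g i j := by
  rw [pvGet_nonneg hi hj, pvGet_nonneg hi hj, pvSet_nonneg hx hy, getD_set_eq]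
  by_cases hix : i = x
  · subst hix
    rw [if_pos ⟨by omega, hxl⟩, getD_set_eq]
    by_cases hjy : j = y
    · subst hjy
      rw [if_pos ⟨by omega, hyl⟩, if_pos ⟨rfl, rfl⟩]
    · rw [if_neg (by omega), if_neg (by simp [hjy])]
  · rw [if_neg (by omega), if_neg (by simp [hix])]

lemma mem_OnesF {g : List (List Int)} {n m : Int} {p : Int × Int} :
    p ∈ OnesF g n m ↔ InGrid n m p ∧ pvGet g p.1 p.2 = 1 := by
  unfold OnesF
  rw [Finset.mem_filter, mem_gridCells]

lemma adjP_iff_dirs {p q : Int × Int} :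
    AdjP p q ↔ ∃ d ∈ pvDirs, q = (p.1 + d.1, p.2 + d.2) := by
  simp only [pvDirs, List.mem_cons, List.not_mem_nil, or_false]
  constructor
  · rintro (rfl | rfl | rfl | rfl)
    · exact ⟨(1, 0), Or.inl rfl, by simp⟩
    · exact ⟨(-1, 0), Or.inr (Or.inl rfl), by simp; omega⟩
    · exact ⟨(0, 1), Or.inr (Or.inr (Or.inl rfl)), by simp⟩
    · exact ⟨(0, -1), Or.inr (Or.inr (Or.inr rfl)), by simp; omega⟩
  · rintro ⟨d, (rfl | rfl | rfl | rfl), rfl⟩ <;> unfold AdjP <;> simp <;> omega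

lemma adjP_of_dir {c d : Int × Int} (hd : d ∈ pvDirs) : AdjP c (c.1 + d.1, c.2 + d.2) :=
  adjP_iff_dirs.mpr ⟨d, hd, rfl⟩

structure BfsInv (h : List (List Int)) (n m blob : Int) (s : Int × Int)
    (g : List (List Int)) (Q : List (Int × Int)) (size : Int)
    (L : Finset (Int × Int)) : Prop where
  len_eq : g.length = h.length
  rows_eq : ∀ k : ℕ, (g.getD k []).length = (h.getD k []).length
  sub_ones : ∀ p ∈ L, p ∈ OnesF h n m
  overlay_in : ∀ p ∈ L, pvGet g p.1 p.2 = blob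
  overlay_out : ∀ p : Int × Int, 0 ≤ p.1 → 0 ≤ p.2 → p ∉ L → pvGet g p.1 p.2 = pvGet h p.1 p.2
  sub_reach : ∀ p ∈ L, ReachR h n m s p
  seed_mem : s ∈ L
  q_sub : ∀ c ∈ Q, c ∈ L
  size_eq : size = (L.card : Int)

lemma nonneg_of_mem_L {h : List (List Int)} {n m : Int} {L : Finset (Int × Int)}
    (hsub : ∀ p ∈ L, p ∈ OnesF h n m) {p : Int × Int} (hp : p ∈ L) :
    0 ≤ p.1 ∧ 0 ≤ p.2 := by
  have := (mem_OnesF.mp (hsub p hp)).1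
  exact ⟨this.1, this.2.2.1⟩

lemma bfsDirStep_spec
    {h : List (List Int)} {n m blob : Int} {s : Int × Int} (c d : Int × Int)
    (hn : h.length = n.toNat)
    (hrow : ∀ k : ℕ, k < h.length → m.toNat ≤ (h.getD k []).length)
    (hblob : 2 ≤ blob)
    (hd : d ∈ pvDirs)
    (g : List (List Int)) (Q : List (Int × Int)) (size : Int) (L : Finset (Int × Int))
    (inv : BfsInv h n m blob s g Q size L) (hcL : c ∈ L) :
    ∃ L', BfsInv h n m blob s (bfsDirStep n m blob c (g, Q, size) d).1
            (bfsDirStep n m blob c (g, Q, size) d).2.1 (bfsDirStep n m blob c (g, Q, size) d).2.2 L' ∧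
      L ⊆ L' ∧
      (∀ x ∈ L', x ∈ L ∨ x ∈ (bfsDirStep n m blob c (g, Q, size) d).2.1) ∧
      (StepR h n m c (c.1 + d.1, c.2 + d.2) → (c.1 + d.1, c.2 + d.2) ∈ L') ∧
      (∀ x ∈ Q, x ∈ (bfsDirStep n m blob c (g, Q, size) d).2.1) ∧
      (bfsDirStep n m blob c (g, Q, size) d).2.1.length + ((OnesF h n m) \ L').card
        = Q.length + ((OnesF h n m) \ L).card := by
  by_cases hguard : 0 ≤ c.1 + d.1 ∧ c.1 + d.1 < n ∧ 0 ≤ c.2 + d.2 ∧ c.2 + d.2 < m ∧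
      pvGet g (c.1 + d.1) (c.2 + d.2) = 1
  · have hstep : bfsDirStep n m blob c (g, Q, size) d
        = (pvSet g (c.1 + d.1) (c.2 + d.2) blob, Q ++ [(c.1 + d.1, c.2 + d.2)], size + 1) := by
      simp only [bfsDirStep]
      rw [if_pos hguard]
    obtain ⟨hg1, hg2, hg3, hg4, hg5⟩ := hguard
    have hqgrid : InGrid n m (c.1 + d.1, c.2 + d.2) := ⟨hg1, hg2, hg3, hg4⟩
    have hqL : (c.1 + d.1, c.2 + d.2) ∉ L := by
      intro hmem
      have := inv.overlay_in _ hmem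
      simp only at this
      omega
    have hqh : pvGet h (c.1 + d.1) (c.2 + d.2) = 1 := by
      have := inv.overlay_out (c.1 + d.1, c.2 + d.2) hg1 hg3 hqL
      simp only at this
      omega
    have hqOnes : (c.1 + d.1, c.2 + d.2) ∈ OnesF h n m := mem_OnesF.mpr ⟨hqgrid, hqh⟩
    have hxl : (c.1 + d.1).toNat < g.length := by rw [inv.len_eq, hn]; omega
    have hyl : (c.2 + d.2).toNat < (g.getD (c.1 + d.1).toNat []).length := by
      rw [inv.rows_eq]
      have := hrow (c.1 + d.1).toNat (by omega)
      omega
    have hset := fun (i j : Int) (hi : 0 ≤ i) (hj : 0 ≤ j) =>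
      pvGet_pvSet (v := blob) hg1 hg3 hxl hyl i j hi hj
    refine ⟨insert (c.1 + d.1, c.2 + d.2) L, ?_, ?_, ?_, ?_, ?_, ?_⟩
    · rw [hstep]
      constructor
      · rw [length_pvSet hg1 hg3]; exact inv.len_eq
      · intro k; rw [rows_pvSet hg1 hg3]; exact inv.rows_eq k
      · intro p hp
        rcases Finset.mem_insert.mp hp with rfl | hp
        · exact hqOnes
        · exact inv.sub_ones p hp
      · intro p hp
        rcases Finset.mem_insert.mp hp with rfl | hp
        · rw [hset _ _ hg1 hg3]; simp
        · obtain ⟨hp1, hp2⟩ := nonneg_of_mem_L inv.sub_ones hp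
          rw [hset _ _ hp1 hp2]
          split_ifs with hpq
          · rfl
          · exact inv.overlay_in p hp
      · intro p hp1 hp2 hpL
        have hpq : ¬ (p.1 = c.1 + d.1 ∧ p.2 = c.2 + d.2) := by
          intro hc
          exact hpL (by
            rw [show p = (c.1 + d.1, c.2 + d.2) from Prod.ext hc.1 hc.2]
            exact Finset.mem_insert_self _ _)
        rw [hset _ _ hp1 hp2, if_neg hpq]
        exact inv.overlay_out p hp1 hp2 (fun hc => hpL (Finset.mem_insert_of_mem hc))
      · intro p hp
        rcases Finset.mem_insert.mp hp with rfl | hp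
        · exact (inv.sub_reach c hcL).tail ⟨adjP_of_dir hd, hqgrid, hqh⟩
        · exact inv.sub_reach p hp
      · exact Finset.mem_insert_of_mem inv.seed_mem
      · intro x hx
        rcases List.mem_append.mp hx with hx | hx
        · exact Finset.mem_insert_of_mem (inv.q_sub x hx)
        · rw [List.mem_singleton.mp hx]; exact Finset.mem_insert_self _ _
      · rw [Finset.card_insert_of_notMem hqL, inv.size_eq]; push_cast; ring
    · exact fun x hx => Finset.mem_insert_of_mem hx
    · intro x hx
      rcases Finset.mem_insert.mp hx with rfl | hx
      · right; rw [hstep]; simp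
      · exact Or.inl hx
    · intro _; exact Finset.mem_insert_self _ _
    · intro x hx; rw [hstep]; simp [hx]
    · rw [hstep]
      simp only [List.length_append, List.length_singleton]
      rw [Finset.sdiff_insert, Finset.card_erase_of_mem (Finset.mem_sdiff.mpr ⟨hqOnes, hqL⟩)]
      have hpos : 0 < ((OnesF h n m) \ L).card :=
        Finset.card_pos.mpr ⟨_, Finset.mem_sdiff.mpr ⟨hqOnes, hqL⟩⟩
      omega
  · have hstep : bfsDirStep n m blob c (g, Q, size) d = (g, Q, size) := by
      simp only [bfsDirStep]
      rw [if_neg hguard]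
    rw [hstep]
    refine ⟨L, inv, fun x hx => hx, fun x hx => Or.inl hx, ?_, fun x hx => hx, rfl⟩
    intro hstepR
    by_contra hqL
    obtain ⟨hadj, hgrid, hval⟩ := hstepR
    have := inv.overlay_out (c.1 + d.1, c.2 + d.2) hgrid.1 hgrid.2.2.1 hqL
    simp only at this hval
    exact hguard ⟨hgrid.1, hgrid.2.1, hgrid.2.2.1, hgrid.2.2.2, by omega⟩

lemma bfsDirs_fold_spec
    {h : List (List Int)} {n m blob : Int} {s : Int × Int} (c : Int × Int)
    (hn : h.length = n.toNat)
    (hrow : ∀ k : ℕ, k < h.length → m.toNat ≤ (h.getD k []).length)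
    (hblob : 2 ≤ blob) :
    ∀ (ds : List (Int × Int)), (∀ d ∈ ds, d ∈ pvDirs) →
    ∀ (g : List (List Int)) (Q : List (Int × Int)) (size : Int) (L : Finset (Int × Int)),
      BfsInv h n m blob s g Q size L → c ∈ L →
    ∃ L', BfsInv h n m blob s (ds.foldl (bfsDirStep n m blob c) (g, Q, size)).1
            (ds.foldl (bfsDirStep n m blob c) (g, Q, size)).2.1
            (ds.foldl (bfsDirStep n m blob c) (g, Q, size)).2.2 L' ∧
      L ⊆ L' ∧
      (∀ x ∈ L', x ∈ L ∨ x ∈ (ds.foldl (bfsDirStep n m blob c) (g, Q, size)).2.1) ∧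
      (∀ d ∈ ds, StepR h n m c (c.1 + d.1, c.2 + d.2) → (c.1 + d.1, c.2 + d.2) ∈ L') ∧
      (∀ x ∈ Q, x ∈ (ds.foldl (bfsDirStep n m blob c) (g, Q, size)).2.1) ∧
      (ds.foldl (bfsDirStep n m blob c) (g, Q, size)).2.1.length + ((OnesF h n m) \ L').card
        = Q.length + ((OnesF h n m) \ L).card := by
  intro ds
  induction ds with
  | nil =>
    intro _ g Q size L inv hcL
    exact ⟨L, inv, fun x hx => hx, fun x hx => Or.inl hx, by simp, fun x hx => hx, rfl⟩
  | cons d ds ih =>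
    intro hsub g Q size L inv hcL
    obtain ⟨L1, inv1, hLL1, hnew1, htgt1, hqmono1, hcnt1⟩ :=
      bfsDirStep_spec c d hn hrow hblob (hsub d (by simp)) g Q size L inv hcL
    set st1 := bfsDirStep n m blob c (g, Q, size) d with hst1
    have inv1' : BfsInv h n m blob s st1.1 st1.2.1 st1.2.2 L1 := inv1
    obtain ⟨L2, inv2, hL1L2, hnew2, htgt2, hqmono2, hcnt2⟩ :=
      ih (fun d' hd' => hsub d' (by simp [hd'])) st1.1 st1.2.1 st1.2.2 L1 inv1' (hLL1 hcL)
    rw [List.foldl_cons]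
    have hfold : ds.foldl (bfsDirStep n m blob c) st1
      = ds.foldl (bfsDirStep n m blob c) (st1.1, st1.2.1, st1.2.2) := by rfl
    rw [hfold]
    refine ⟨L2, inv2, fun x hx => hL1L2 (hLL1 hx), ?_, ?_, ?_, ?_⟩
    · intro x hx
      rcases hnew2 x hx with hx1 | hx2
      · rcases hnew1 x hx1 with hx0 | hxq
        · exact Or.inl hx0
        · exact Or.inr (hqmono2 x hxq)
      · exact Or.inr hx2
    · intro d' hd' hstepR
      rcases List.mem_cons.mp hd' with rfl | hd'
      · exact hL1L2 (htgt1 hstepR)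
      · exact htgt2 d' hd' hstepR
    · intro x hx
      exact hqmono2 x (hqmono1 x hx)
    · omega

lemma bfsLoop_spec
    {h : List (List Int)} {n m blob : Int} {s : Int × Int}
    (hn : h.length = n.toNat)
    (hrow : ∀ k : ℕ, k < h.length → m.toNat ≤ (h.getD k []).length)
    (hblob : 2 ≤ blob) (hone : OneC h n m s) :
    ∀ (fuel : ℕ) (g : List (List Int)) (Q : List (Int × Int)) (size : Int)
      (L : Finset (Int × Int)),
      BfsInv h n m blob s g Q size L →
      (∀ p ∈ L, p ∉ Q → ∀ q, StepR h n m p q → q ∈ L) →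
      Q.length + ((OnesF h n m) \ L).card ≤ fuel →
    ∃ gf, bfsLoop n m blob fuel g Q size = (gf, ((ReachF h n m s).card : Int)) ∧
      gf.length = h.length ∧ (∀ k : ℕ, (gf.getD k []).length = (h.getD k []).length) ∧
      (∀ p ∈ ReachF h n m s, pvGet gf p.1 p.2 = blob) ∧
      (∀ p : Int × Int, 0 ≤ p.1 → 0 ≤ p.2 → p ∉ ReachF h n m s →
        pvGet gf p.1 p.2 = pvGet h p.1 p.2) := by
  intro fuel
  induction fuel with
  | zero =>
    intro g Q size L inv hclosed hfuel
    have hQ : Q = [] := by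
      rcases Q with _ | ⟨c, rest⟩
      · rfl
      · simp at hfuel
    subst hQ
    have hLR : L = ReachF h n m s := by
      apply Finset.ext
      intro x
      rw [mem_ReachF]
      constructor
      · intro hx
        exact ⟨inv.sub_reach x hx, (mem_OnesF.mp (inv.sub_ones x hx)).1⟩
      · rintro ⟨hx, -⟩
        exact closed_reach_mem (· ∈ L) inv.seed_mem
          (fun p q hp hstep => hclosed p hp (by simp) q hstep) hx
    refine ⟨g, ?_, inv.len_eq, inv.rows_eq, ?_, ?_⟩
    · simp only [bfsLoop]
      rw [inv.size_eq, hLR]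
    · intro p hp; exact inv.overlay_in p (by rw [hLR]; exact hp)
    · intro p hp1 hp2 hp; exact inv.overlay_out p hp1 hp2 (by rw [hLR]; exact hp)
  | succ fuel ih =>
    intro g Q size L inv hclosed hfuel
    rcases Q with _ | ⟨c, rest⟩
    · -- queue empty: same argument as fuel = 0
      have hLR : L = ReachF h n m s := by
        apply Finset.ext
        intro x
        rw [mem_ReachF]
        constructor
        · intro hx
          exact ⟨inv.sub_reach x hx, (mem_OnesF.mp (inv.sub_ones x hx)).1⟩
        · rintro ⟨hx, -⟩
          exact closed_reach_mem (· ∈ L) inv.seed_mem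
            (fun p q hp hstep => hclosed p hp (by simp) q hstep) hx
      refine ⟨g, ?_, inv.len_eq, inv.rows_eq, ?_, ?_⟩
      · simp only [bfsLoop]
        rw [inv.size_eq, hLR]
      · intro p hp; exact inv.overlay_in p (by rw [hLR]; exact hp)
      · intro p hp1 hp2 hp; exact inv.overlay_out p hp1 hp2 (by rw [hLR]; exact hp)
    · have hcL : c ∈ L := inv.q_sub c (by simp)
      have invRest : BfsInv h n m blob s g rest size L :=
        { inv with q_sub := fun x hx => inv.q_sub x (by simp [hx]) }
      obtain ⟨L', inv', hLL', hnew', htgt', hqmono', hcnt'⟩ :=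
        bfsDirs_fold_spec c hn hrow hblob pvDirs (fun d hd => hd) g rest size L invRest hcL
      set st := pvDirs.foldl (bfsDirStep n m blob c) (g, rest, size) with hst
      have hrun : bfsLoop n m blob (fuel + 1) g (c :: rest) size
          = bfsLoop n m blob fuel st.1 st.2.1 st.2.2 := by
        simp only [bfsLoop]
        rw [hst]
      rw [hrun]
      apply ih st.1 st.2.1 st.2.2 L' inv'
      · -- closedness for the next iteration
        intro p hp hpQ q hstep
        rcases hnew' p hp with hpL | hpQ'
        · by_cases hpc : p = c
          · subst hpc
            obtain ⟨d, hd, rfl⟩ := adjP_iff_dirs.mp hstep.1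
            exact htgt' d hd hstep
          · have hpRest : p ∉ rest := fun hr => hpQ (hqmono' p hr)
            have : p ∉ (c :: rest) := by simp [hpc, hpRest]
            exact hLL' (hclosed p hpL this q hstep)
        · exact absurd hpQ' hpQ
      · -- fuel accounting
        have : (c :: rest).length + ((OnesF h n m) \ L).card ≤ fuel + 1 := hfuel
        simp only [List.length_cons] at this
        omega

lemma pvBfs_spec
    {h : List (List Int)} {n m blob : Int} {x y : Int}
    (hn : h.length = n.toNat)
    (hrow : ∀ k : ℕ, k < h.length → m.toNat ≤ (h.getD k []).length)
    (hblob : 2 ≤ blob) (hone : OneC h n m (x, y)) :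
    ∃ gf, pvBfs n m h x y blob = (gf, ((ReachF h n m (x, y)).card : Int)) ∧
      gf.length = h.length ∧ (∀ k : ℕ, (gf.getD k []).length = (h.getD k []).length) ∧
      (∀ p ∈ ReachF h n m (x, y), pvGet gf p.1 p.2 = blob) ∧
      (∀ p : Int × Int, 0 ≤ p.1 → 0 ≤ p.2 → p ∉ ReachF h n m (x, y) →
        pvGet gf p.1 p.2 = pvGet h p.1 p.2) := by
  obtain ⟨⟨hx0, hxn, hy0, hym⟩, hval⟩ := hone
  simp only at hx0 hxn hy0 hym hval
  have hxl : x.toNat < h.length := by omega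
  have hyl : y.toNat < (h.getD x.toNat []).length := by
    have := hrow x.toNat hxl
    omega
  have hset := fun (i j : Int) (hi : 0 ≤ i) (hj : 0 ≤ j) =>
    pvGet_pvSet (v := blob) hx0 hy0 hxl hyl i j hi hj
  have hsOnes : (x, y) ∈ OnesF h n m := mem_OnesF.mpr ⟨⟨hx0, hxn, hy0, hym⟩, hval⟩
  have inv0 : BfsInv h n m blob (x, y) (pvSet h x y blob) [(x, y)] 1 {(x, y)} := by
    constructor
    · exact length_pvSet hx0 hy0
    · intro k; exact rows_pvSet hx0 hy0 k
    · intro p hp; rw [Finset.mem_singleton.mp hp]; exact hsOnes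
    · intro p hp
      rw [Finset.mem_singleton.mp hp]
      rw [hset x y hx0 hy0]; simp
    · intro p hp1 hp2 hp
      rw [hset p.1 p.2 hp1 hp2, if_neg]
      intro hc
      exact hp (Finset.mem_singleton.mpr (Prod.ext hc.1 hc.2))
    · intro p hp
      rw [Finset.mem_singleton.mp hp]
      exact Relation.ReflTransGen.refl
    · exact Finset.mem_singleton_self _
    · intro c hc; rw [List.mem_singleton.mp hc]; exact Finset.mem_singleton_self _
    · simp
  have hones_le : (OnesF h n m).card ≤ n.toNat * m.toNat := by
    calc (OnesF h n m).card ≤ (gridCells n m).card := Finset.card_filter_le _ _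
    _ = n.toNat * m.toNat := card_gridCells n m
  have hfuel : ([(x, y)] : List (Int × Int)).length + ((OnesF h n m) \ {(x, y)}).card
      ≤ n.toNat * m.toNat + 1 := by
    have hint : (({(x, y)} : Finset (Int × Int)) ∩ OnesF h n m) = {(x, y)} := by
      rw [Finset.inter_eq_left]
      exact Finset.singleton_subset_iff.mpr hsOnes
    have hcs : ((OnesF h n m) \ {(x, y)}).card
        = (OnesF h n m).card - (({(x, y)} : Finset (Int × Int)) ∩ OnesF h n m).card :=
      Finset.card_sdiff
    rw [hint, Finset.card_singleton] at hcs
    have hpos : 0 < (OnesF h n m).card := Finset.card_pos.mpr ⟨_, hsOnes⟩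
    simp only [List.length_singleton]
    omega
  have hclosed0 : ∀ p ∈ ({(x, y)} : Finset (Int × Int)), p ∉ [(x, y)] →
      ∀ q, StepR h n m p q → q ∈ ({(x, y)} : Finset (Int × Int)) := by
    intro p hp hpQ
    rw [Finset.mem_singleton.mp hp] at hpQ
    simp at hpQ
  exact bfsLoop_spec hn hrow hblob ⟨⟨hx0, hxn, hy0, hym⟩, hval⟩
    (n.toNat * m.toNat + 1) (pvSet h x y blob) [(x, y)] 1 {(x, y)} inv0 hclosed0 hfuel

-- ===== B-side: frontier expansion =====
lemma mem_newCells_inner {land : List (List Int)} {n m : Int} {comp : PySem.Set (Int × Int)}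
    (nbrs : List (Int × Int)) (s0 : PySem.Set (Int × Int)) (x : Int × Int) :
    (x ∈ nbrs.foldl (fun s q =>
      if 0 ≤ q.1 ∧ q.1 < n ∧ 0 ≤ q.2 ∧ q.2 < m ∧ pvGet land q.1 q.2 = 1 ∧ ¬ q ∈ comp then
        PySem.Set.add s q
      else s) s0) ↔
    x ∈ s0 ∨ ∃ q ∈ nbrs, (InGrid n m q ∧ pvGet land q.1 q.2 = 1 ∧ q ∉ comp) ∧ x = q := by
  induction nbrs generalizing s0 with
  | nil => simp
  | cons q qs ih =>
    rw [List.foldl_cons]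
    split_ifs with hq
    · rw [ih]
      simp only [PySem.Set.mem_add, List.mem_cons]
      constructor
      · rintro ((hx | rfl) | ⟨r, hr, hcond, rfl⟩)
        · exact Or.inl hx
        · exact Or.inr ⟨x, Or.inl rfl, ⟨⟨hq.1, hq.2.1, hq.2.2.1, hq.2.2.2.1⟩, hq.2.2.2.2.1, hq.2.2.2.2.2⟩, rfl⟩
        · exact Or.inr ⟨x, Or.inr hr, hcond, rfl⟩
      · rintro (hx | ⟨r, (rfl | hr), hcond, rfl⟩)
        · exact Or.inl (Or.inl hx)
        · exact Or.inl (Or.inr rfl)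
        · exact Or.inr ⟨x, hr, hcond, rfl⟩
    · rw [ih]
      simp only [List.mem_cons]
      constructor
      · rintro (hx | ⟨r, hr, hcond, rfl⟩)
        · exact Or.inl hx
        · exact Or.inr ⟨x, Or.inr hr, hcond, rfl⟩
      · rintro (hx | ⟨r, (rfl | hr), hcond, rfl⟩)
        · exact Or.inl hx
        · exact absurd ⟨hcond.1.1, hcond.1.2.1, hcond.1.2.2.1, hcond.1.2.2.2,
            hcond.2.1, hcond.2.2⟩ hq
        · exact Or.inr ⟨x, hr, hcond, rfl⟩

lemma mem_newCells {land : List (List Int)} {n m : Int} {comp : PySem.Set (Int × Int)}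
    (x : Int × Int) :
    x ∈ newCells land n m comp ↔
    ∃ p ∈ comp, AdjP p x ∧ InGrid n m x ∧ pvGet land x.1 x.2 = 1 ∧ x ∉ comp := by
  unfold newCells
  have gen : ∀ (l : List (Int × Int)) (s0 : PySem.Set (Int × Int)),
      (x ∈ l.foldl (fun s c =>
        (pvNbrs c).foldl (fun s q =>
          if 0 ≤ q.1 ∧ q.1 < n ∧ 0 ≤ q.2 ∧ q.2 < m ∧ pvGet land q.1 q.2 = 1 ∧ ¬ q ∈ comp then
            PySem.Set.add s q
          else s) s) s0) ↔
      x ∈ s0 ∨ ∃ p ∈ l, AdjP p x ∧ InGrid n m x ∧ pvGet land x.1 x.2 = 1 ∧ x ∉ comp := by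
    intro l
    induction l with
    | nil => simp
    | cons c cs ih =>
      intro s0
      rw [List.foldl_cons, ih, mem_newCells_inner]
      constructor
      · rintro ((hx | ⟨q, hq, hcond, rfl⟩) | ⟨p, hp, hrest⟩)
        · exact Or.inl hx
        · exact Or.inr ⟨c, List.mem_cons_self, mem_pvNbrs.mp hq, hcond.1, hcond.2.1, hcond.2.2⟩
        · exact Or.inr ⟨p, List.mem_cons_of_mem _ hp, hrest⟩
      · rintro (hx | ⟨p, hp, hadj, hgrid, hval, hnotin⟩)
        · exact Or.inl (Or.inl hx)
        · rcases List.mem_cons.mp hp with rfl | hp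
          · exact Or.inl (Or.inr ⟨x, mem_pvNbrs.mpr hadj, ⟨hgrid, hval, hnotin⟩, rfl⟩)
          · exact Or.inr ⟨p, hp, hadj, hgrid, hval, hnotin⟩
  rw [gen]
  simp

lemma growLoop_spec {land : List (List Int)} {n m : Int} {s : Int × Int}
    (hone : OneC land n m s) :
    ∀ (fuel : ℕ) (comp : PySem.Set (Int × Int)), comp.Nodup → s ∈ comp →
      (∀ x ∈ comp, ReachR land n m s x) →
      (ReachF land n m s).card ≤ fuel + comp.toFinset.card →
    (growLoop land n m fuel comp).Nodup ∧
      ∀ x, x ∈ growLoop land n m fuel comp ↔ x ∈ ReachF land n m s := by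
  intro fuel
  induction fuel with
  | zero =>
    intro comp hnd hs hreach hcard
    have hsub : comp.toFinset ⊆ ReachF land n m s := by
      intro x hx
      rw [List.mem_toFinset] at hx
      exact (mem_ReachF_of_one hone).mpr (hreach x hx)
    have heq : comp.toFinset = ReachF land n m s :=
      Finset.eq_of_subset_of_card_le hsub (by simpa using hcard)
    refine ⟨hnd, fun x => ?_⟩
    rw [show growLoop land n m 0 comp = comp from rfl, ← heq, List.mem_toFinset]
  | succ fuel ih =>
    intro comp hnd hs hreach hcard
    have hrun : growLoop land n m (fuel + 1) comp
        = if (newCells land n m comp).isEmpty then comp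
          else growLoop land n m fuel (PySem.Set.union comp (newCells land n m comp)) := by
      simp only [growLoop]
    rw [hrun]
    by_cases hemp : (newCells land n m comp).isEmpty
    · rw [if_pos hemp]
      have hnil : newCells land n m comp = [] := List.isEmpty_iff.mp hemp
      have hclosed : ∀ p ∈ comp, ∀ q, StepR land n m p q → q ∈ comp := by
        intro p hp q hstep
        by_contra hqc
        have : q ∈ newCells land n m comp :=
          (mem_newCells q).mpr ⟨p, hp, hstep.1, hstep.2.1, hstep.2.2, hqc⟩
        rw [hnil] at this
        exact List.not_mem_nil this
      refine ⟨hnd, fun x => ?_⟩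
      constructor
      · intro hx
        exact (mem_ReachF_of_one hone).mpr (hreach x hx)
      · intro hx
        exact closed_reach_mem (· ∈ comp) hs (fun p q hp hstep => hclosed p hp q hstep)
          ((mem_ReachF_of_one hone).mp hx)
    · rw [if_neg hemp]
      have hnenil : newCells land n m comp ≠ [] := fun hc => hemp (by simp [hc])
      obtain ⟨y, hy⟩ := List.exists_mem_of_ne_nil _ hnenil
      obtain ⟨py, hpy, hady, hgy, hvy, hyc⟩ := (mem_newCells y).mp hy
      have hnewreach : ∀ x ∈ newCells land n m comp, ReachR land n m s x := by
        intro x hx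
        obtain ⟨p, hp, hadj, hgrid, hval, -⟩ := (mem_newCells x).mp hx
        exact (hreach p hp).tail ⟨hadj, hgrid, hval⟩
      have hmem_union : ∀ x, x ∈ PySem.Set.union comp (newCells land n m comp) ↔
          x ∈ comp ∨ x ∈ newCells land n m comp := fun x => PySem.Set.mem_union _ _ x
      have hsubset : comp.toFinset ⊂ (PySem.Set.union comp (newCells land n m comp)).toFinset := by
        constructor
        · intro x hx
          rw [List.mem_toFinset] at hx ⊢
          exact (hmem_union x).mpr (Or.inl hx)
        · intro hsub
          have := hsub (List.mem_toFinset.mpr ((hmem_union y).mpr (Or.inr hy)))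
          rw [List.mem_toFinset] at this
          exact hyc this
      have hcardlt : comp.toFinset.card < (PySem.Set.union comp (newCells land n m comp)).toFinset.card :=
        Finset.card_lt_card hsubset
      refine ih (PySem.Set.union comp (newCells land n m comp)) (PySem.Set.nodup_union _ _ hnd) ?_ ?_ ?_
      · exact (hmem_union s).mpr (Or.inl hs)
      · intro x hx
        rcases (hmem_union x).mp hx with hx | hx
        · exact hreach x hx
        · exact hnewreach x hx
      · omega

-- ===== the outer scan: joint invariant between the two programs =====
def CellsU (CS : List (Finset (Int × Int))) (p : Int × Int) : Prop := ∃ C ∈ CS, p ∈ C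

lemma getD_append_lt {α : Type} (l l' : List α) (k : ℕ) (d : α) (h : k < l.length) :
    (l ++ l').getD k d = l.getD k d := by
  simp [List.getD_eq_getElem?_getD, List.getElem?_append_left h]

lemma getD_append_len {α : Type} (l : List α) (x : α) (d : α) :
    (l ++ [x]).getD l.length d = x := by
  simp [List.getD_eq_getElem?_getD]

lemma mem_iff_getD {α : Type} (l : List α) (C : α) (d : α) :
    C ∈ l ↔ ∃ k, k < l.length ∧ l.getD k d = C := by
  constructor
  · intro h
    obtain ⟨k, hk, hget⟩ := List.mem_iff_getElem.mp h
    exact ⟨k, hk, by simp [List.getD_eq_getElem?_getD, List.getElem?_eq_getElem hk, hget]⟩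
  · rintro ⟨k, hk, hget⟩
    rw [List.getD_eq_getElem?_getD, List.getElem?_eq_getElem hk] at hget
    simp only [Option.getD_some] at hget
    exact hget ▸ List.getElem_mem hk

lemma dict_getD_insert_self (d : PySem.Dict Int Int) (k v : Int) :
    PySem.Dict.getD (d.insert k v) k 0 = v := by
  simp [PySem.Dict.getD, PySem.Dict.get?_insert_self]

lemma dict_getD_insert_ne (d : PySem.Dict Int Int) (k k' v w : Int) (h : k' ≠ k) :
    PySem.Dict.getD (d.insert k v) k' w = PySem.Dict.getD d k' w := by
  simp [PySem.Dict.getD, PySem.Dict.get?_insert_of_ne d v h]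

structure OuterInv (land : List (List Int)) (n m : Int)
    (g : List (List Int)) (dict : PySem.Dict Int Int) (blob : Int)
    (comps : List (PySem.Set (Int × Int))) (covered : PySem.Set (Int × Int))
    (CS : List (Finset (Int × Int))) : Prop where
  len_eq : g.length = land.length
  rows_eq : ∀ k : ℕ, (g.getD k []).length = (land.getD k []).length
  labeled : ∀ k : ℕ, k < CS.length → ∀ p ∈ CS.getD k ∅, pvGet g p.1 p.2 = 2 + (k : Int)
  unlabeled : ∀ p : Int × Int, 0 ≤ p.1 → 0 ≤ p.2 → ¬ CellsU CS p →
    pvGet g p.1 p.2 = pvGet land p.1 p.2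
  dictv : ∀ j : ℕ, j < CS.length →
    PySem.Dict.getD dict (2 + (j : Int)) 0 = ((CS.getD j ∅).card : Int)
  blob_eq : blob = 2 + (CS.length : Int)
  comps_len : comps.length = CS.length
  comps_nodup : ∀ k : ℕ, k < CS.length → (comps.getD k []).Nodup
  comps_mem : ∀ k : ℕ, k < CS.length → ∀ p, p ∈ comps.getD k [] ↔ p ∈ CS.getD k ∅
  covered_nodup : covered.Nodup
  covered_mem : ∀ p, p ∈ covered ↔ CellsU CS p
  cs_one : ∀ C ∈ CS, ∀ p ∈ C, OneC land n m p
  cs_closed : ∀ C ∈ CS, ∀ p ∈ C, ∀ q, StepR land n m p q → q ∈ C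

lemma covered_value_ne_one {g : List (List Int)}
    {CS : List (Finset (Int × Int))}
    (labeled : ∀ k : ℕ, k < CS.length → ∀ p ∈ CS.getD k ∅, pvGet g p.1 p.2 = 2 + (k : Int))
    {p : Int × Int} (hp : CellsU CS p) : pvGet g p.1 p.2 ≠ 1 := by
  obtain ⟨C, hC, hpC⟩ := hp
  obtain ⟨k, hk, rfl⟩ := (mem_iff_getD CS C ∅).mp hC
  rw [labeled k hk p hpC]
  omega

lemma stepR_g_imp_land {land g : List (List Int)} {n m : Int}
    {CS : List (Finset (Int × Int))}
    (labeled : ∀ k : ℕ, k < CS.length → ∀ p ∈ CS.getD k ∅, pvGet g p.1 p.2 = 2 + (k : Int))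
    (unlabeled : ∀ p : Int × Int, 0 ≤ p.1 → 0 ≤ p.2 → ¬ CellsU CS p →
      pvGet g p.1 p.2 = pvGet land p.1 p.2)
    {p q : Int × Int} (h : StepR g n m p q) : StepR land n m p q ∧ ¬ CellsU CS q := by
  obtain ⟨hadj, hgrid, hval⟩ := h
  have hnc : ¬ CellsU CS q := fun hc => covered_value_ne_one labeled hc hval
  refine ⟨⟨hadj, hgrid, ?_⟩, hnc⟩
  rw [← unlabeled q hgrid.1 hgrid.2.2.1 hnc]
  exact hval

lemma reachR_congr {land g : List (List Int)} {n m : Int}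
    {CS : List (Finset (Int × Int))}
    (labeled : ∀ k : ℕ, k < CS.length → ∀ p ∈ CS.getD k ∅, pvGet g p.1 p.2 = 2 + (k : Int))
    (unlabeled : ∀ p : Int × Int, 0 ≤ p.1 → 0 ≤ p.2 → ¬ CellsU CS p →
      pvGet g p.1 p.2 = pvGet land p.1 p.2)
    (cs_closed : ∀ C ∈ CS, ∀ p ∈ C, ∀ q, StepR land n m p q → q ∈ C)
    {s : Int × Int} (hs_unc : ¬ CellsU CS s) (hone : OneC land n m s) :
    ∀ x, ReachR g n m s x ↔ ReachR land n m s x := by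
  have havoid : ∀ x, ReachR land n m s x → ¬ CellsU CS x := by
    intro x hx
    refine reach_avoids (CellsU CS) ?_ hone hs_unc hx
    rintro p q ⟨C, hC, hpC⟩ hstep
    exact ⟨C, hC, cs_closed C hC p hpC q hstep⟩
  intro x
  constructor
  · intro hx
    exact Relation.ReflTransGen.mono
      (fun p q h => (stepR_g_imp_land labeled unlabeled h).1) hx
  · intro hx
    refine closed_reach_mem (ReachR g n m s) Relation.ReflTransGen.refl ?_ hx
    intro p q hp hstep
    have hpland : ReachR land n m s p := Relation.ReflTransGen.mono
      (fun a b h => (stepR_g_imp_land labeled unlabeled h).1) hp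
    have hqland : ReachR land n m s q := hpland.tail hstep
    have hq_unc : ¬ CellsU CS q := havoid q hqland
    refine hp.tail ⟨hstep.1, hstep.2.1, ?_⟩
    rw [unlabeled q hstep.2.1.1 hstep.2.1.2.2.1 hq_unc]
    exact hstep.2.2

lemma reachF_congr {land g : List (List Int)} {n m : Int}
    {CS : List (Finset (Int × Int))}
    (labeled : ∀ k : ℕ, k < CS.length → ∀ p ∈ CS.getD k ∅, pvGet g p.1 p.2 = 2 + (k : Int))
    (unlabeled : ∀ p : Int × Int, 0 ≤ p.1 → 0 ≤ p.2 → ¬ CellsU CS p →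
      pvGet g p.1 p.2 = pvGet land p.1 p.2)
    (cs_closed : ∀ C ∈ CS, ∀ p ∈ C, ∀ q, StepR land n m p q → q ∈ C)
    {s : Int × Int} (hs_unc : ¬ CellsU CS s) (hone : OneC land n m s) :
    ReachF g n m s = ReachF land n m s := by
  apply Finset.ext
  intro x
  rw [mem_ReachF, mem_ReachF, reachR_congr labeled unlabeled cs_closed hs_unc hone x]

lemma foldl_flatMap_pairs {σ : Type} (f : σ → Int → Int → σ) (rows cols : List Int) (init : σ) :
    rows.foldl (fun st i => cols.foldl (fun st j => f st i j) st) init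
    = (rows.flatMap (fun i => cols.map (fun j => (i, j)))).foldl
        (fun st (q : Int × Int) => f st q.1 q.2) init := by
  induction rows generalizing init with
  | nil => rfl
  | cons r rs ih =>
    rw [List.flatMap_cons, List.foldl_append, List.foldl_map, List.foldl_cons, ih]

lemma outer_fold_spec {land : List (List Int)} {n m : Int}
    (hn : land.length = n.toNat)
    (hrowm : ∀ k : ℕ, k < land.length → m.toNat ≤ (land.getD k []).length)
    (hle1 : ∀ p : Int × Int, InGrid n m p → pvGet land p.1 p.2 ≤ 1) :
    ∀ (cells : List (Int × Int)), (∀ p ∈ cells, InGrid n m p) →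
    ∀ (g : List (List Int)) (dict : PySem.Dict Int Int) (blob : Int)
      (comps : List (PySem.Set (Int × Int))) (covered : PySem.Set (Int × Int))
      (CS : List (Finset (Int × Int))),
      OuterInv land n m g dict blob comps covered CS →
    ∃ CS',
      OuterInv land n m
        (cells.foldl (fun st (q : Int × Int) =>
          if pvGet st.1 q.1 q.2 = 1 then
            let r := pvBfs n m st.1 q.1 q.2 st.2.2
            (r.1, PySem.Dict.insert st.2.1 st.2.2 r.2, st.2.2 + 1)
          else st) (g, dict, blob)).1
        (cells.foldl (fun st (q : Int × Int) =>
          if pvGet st.1 q.1 q.2 = 1 then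
            let r := pvBfs n m st.1 q.1 q.2 st.2.2
            (r.1, PySem.Dict.insert st.2.1 st.2.2 r.2, st.2.2 + 1)
          else st) (g, dict, blob)).2.1
        (cells.foldl (fun st (q : Int × Int) =>
          if pvGet st.1 q.1 q.2 = 1 then
            let r := pvBfs n m st.1 q.1 q.2 st.2.2
            (r.1, PySem.Dict.insert st.2.1 st.2.2 r.2, st.2.2 + 1)
          else st) (g, dict, blob)).2.2
        (cells.foldl (fun st (q : Int × Int) =>
          if pvGet land q.1 q.2 ≠ 1 ∨ (q.1, q.2) ∈ st.2 then st
          else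
            let comp := growLoop land n m (n.toNat * m.toNat) (PySem.Set.ofList [(q.1, q.2)])
            (st.1 ++ [comp], PySem.Set.union st.2 comp)) (comps, covered)).1
        (cells.foldl (fun st (q : Int × Int) =>
          if pvGet land q.1 q.2 ≠ 1 ∨ (q.1, q.2) ∈ st.2 then st
          else
            let comp := growLoop land n m (n.toNat * m.toNat) (PySem.Set.ofList [(q.1, q.2)])
            (st.1 ++ [comp], PySem.Set.union st.2 comp)) (comps, covered)).2
        CS' := by
  intro cells
  induction cells with
  | nil =>
    intro _ g dict blob comps covered CS inv
    exact ⟨CS, inv⟩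
  | cons q rest ih =>
    intro hcells g dict blob comps covered CS inv
    obtain ⟨i, j⟩ := q
    have hgrid : InGrid n m (i, j) := hcells (i, j) (by simp)
    simp only [List.foldl_cons]
    by_cases hcov : CellsU CS (i, j)
    · -- already part of an earlier component: both sides skip
      have hA : pvGet g i j ≠ 1 := covered_value_ne_one inv.labeled hcov
      have hB : (i, j) ∈ covered := (inv.covered_mem (i, j)).mpr hcov
      rw [if_neg (by simpa using hA), if_pos (by simp [hB])]
      exact ih (fun p hp => hcells p (by simp [hp])) g dict blob comps covered CS inv
    · have hval_eq : pvGet g i j = pvGet land i j := by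
        have := inv.unlabeled (i, j) hgrid.1 hgrid.2.2.1 hcov
        simpa using this
      by_cases hone : pvGet land i j = 1
      · -- a fresh seed: A runs BFS, B grows the component
        have hBcond : ¬ (pvGet land i j ≠ 1 ∨ (i, j) ∈ covered) := by
          push Not
          exact ⟨hone, fun hc => hcov ((inv.covered_mem (i, j)).mp hc)⟩
        rw [if_pos (by simpa using hval_eq.trans hone), if_neg (by simpa using hBcond)]
        have honeland : OneC land n m (i, j) := ⟨hgrid, by simpa using hone⟩
        have honeg : OneC g n m (i, j) := ⟨hgrid, by simp only; omega⟩
        have hgn : g.length = n.toNat := inv.len_eq.trans hn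
        have hgrow : ∀ k : ℕ, k < g.length → m.toNat ≤ (g.getD k []).length := by
          intro k hk
          rw [inv.rows_eq k]
          exact hrowm k (by omega)
        have hblob2 : 2 ≤ blob := by rw [inv.blob_eq]; omega
        obtain ⟨gf, hbfs, hlenf, hrowsf, hin_f, hout_f⟩ :=
          pvBfs_spec (x := i) (y := j) hgn hgrow hblob2 honeg
        have hRF : ReachF g n m (i, j) = ReachF land n m (i, j) :=
          reachF_congr inv.labeled inv.unlabeled inv.cs_closed hcov honeland
        set C : Finset (Int × Int) := ReachF land n m (i, j) with hC
        have havoid : ∀ x ∈ C, ¬ CellsU CS x := by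
          intro x hx
          refine reach_avoids (CellsU CS) ?_ honeland hcov ((mem_ReachF_of_one honeland).mp hx)
          rintro p q ⟨D, hD, hpD⟩ hstep
          exact ⟨D, hD, inv.cs_closed D hD p hpD q hstep⟩
        -- B's component
        have hgrown := growLoop_spec honeland (n.toNat * m.toNat) (PySem.Set.ofList [(i, j)])
          (PySem.Set.nodup_ofList _) (by simp [PySem.Set.mem_ofList])
          (by
            intro x hx
            rw [PySem.Set.mem_ofList] at hx
            simp only [List.mem_singleton] at hx
            rw [hx]
            exact Relation.ReflTransGen.refl)
          (by
            have h1 : (ReachF land n m (i, j)).card ≤ n.toNat * m.toNat := card_ReachF_le _ _ _ _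
            have h2 : 1 ≤ (PySem.Set.ofList [((i : Int), (j : Int))]).toFinset.card := by
              apply Finset.card_pos.mpr
              exact ⟨(i, j), List.mem_toFinset.mpr (by simp [PySem.Set.mem_ofList])⟩
            omega)
        obtain ⟨hcomp_nodup, hcomp_mem⟩ := hgrown
        set comp := growLoop land n m (n.toNat * m.toNat) (PySem.Set.ofList [(i, j)]) with hcompdef
        -- the new invariant
        have hbfs1 : (pvBfs n m g i j blob).1 = gf := by rw [hbfs]
        have hbfs2 : (pvBfs n m g i j blob).2 = ((ReachF g n m (i, j)).card : Int) := by rw [hbfs]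
        have hnew : OuterInv land n m gf (PySem.Dict.insert dict blob ((ReachF g n m (i, j)).card : Int))
            (blob + 1) (comps ++ [comp]) (PySem.Set.union covered comp) (CS ++ [C]) := by
          have hlen' : (CS ++ [C]).length = CS.length + 1 := by simp
          constructor
          · exact hlenf.trans inv.len_eq
          · intro k; rw [hrowsf k]; exact inv.rows_eq k
          · -- labeled
            intro k hk p hp
            rw [hlen'] at hk
            by_cases hklt : k < CS.length
            · rw [getD_append_lt _ _ _ _ hklt] at hp
              have hmemCS : CS.getD k ∅ ∈ CS := (mem_iff_getD CS _ ∅).mpr ⟨k, hklt, rfl⟩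
              have hpC : p ∉ C := fun hc => havoid p hc ⟨CS.getD k ∅, hmemCS, hp⟩
              have hnonneg := ((inv.cs_one _ hmemCS p hp).1)
              rw [hout_f p hnonneg.1 hnonneg.2.2.1 (by rw [hRF]; exact hpC)]
              exact inv.labeled k hklt p hp
            · have hkeq : k = CS.length := by omega
              subst hkeq
              rw [getD_append_len] at hp
              have := hin_f p (by rw [hRF]; exact hp)
              rw [this, inv.blob_eq]
          · -- unlabeled
            intro p hp1 hp2 hpcu
            have hpold : ¬ CellsU CS p := by
              intro ⟨D, hD, hpD⟩
              exact hpcu ⟨D, List.mem_append_left _ hD, hpD⟩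
            have hpC : p ∉ C := by
              intro hc
              exact hpcu ⟨C, List.mem_append_right _ (by simp), hc⟩
            rw [hout_f p hp1 hp2 (by rw [hRF]; exact hpC)]
            exact inv.unlabeled p hp1 hp2 hpold
          · -- dict values
            intro jj hjj
            rw [hlen'] at hjj
            by_cases hjlt : jj < CS.length
            · rw [getD_append_lt _ _ _ _ hjlt]
              rw [dict_getD_insert_ne dict blob _ _ _ (by rw [inv.blob_eq]; omega)]
              exact inv.dictv jj hjlt
            · have : jj = CS.length := by omega
              subst this
              rw [getD_append_len, ← inv.blob_eq, dict_getD_insert_self, hRF]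
          · -- blob
            rw [inv.blob_eq, hlen']; push_cast; ring
          · simp [inv.comps_len]
          · -- comps nodup
            intro k hk
            rw [hlen'] at hk
            by_cases hklt : k < CS.length
            · rw [getD_append_lt _ _ _ _ (by rw [inv.comps_len]; exact hklt)]
              exact inv.comps_nodup k hklt
            · have : k = CS.length := by omega
              subst this
              rw [← inv.comps_len, getD_append_len]
              exact hcomp_nodup
          · -- comps membership
            intro k hk p
            rw [hlen'] at hk
            by_cases hklt : k < CS.length
            · rw [getD_append_lt _ _ _ _ (by rw [inv.comps_len]; exact hklt),
                getD_append_lt _ _ _ _ hklt]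
              exact inv.comps_mem k hklt p
            · have : k = CS.length := by omega
              subst this
              rw [← inv.comps_len, getD_append_len, inv.comps_len, getD_append_len]
              exact hcomp_mem p
          · exact PySem.Set.nodup_union _ _ inv.covered_nodup
          · -- covered membership
            intro p
            rw [PySem.Set.mem_union]
            constructor
            · rintro (hp | hp)
              · obtain ⟨D, hD, hpD⟩ := (inv.covered_mem p).mp hp
                exact ⟨D, List.mem_append_left _ hD, hpD⟩
              · exact ⟨C, List.mem_append_right _ (by simp), (hcomp_mem p).mp hp⟩
            · rintro ⟨D, hD, hpD⟩
              rcases List.mem_append.mp hD with hD | hD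
              · exact Or.inl ((inv.covered_mem p).mpr ⟨D, hD, hpD⟩)
              · rw [List.mem_singleton.mp hD] at hpD
                exact Or.inr ((hcomp_mem p).mpr hpD)
          · -- cs_one
            intro D hD p hp
            rcases List.mem_append.mp hD with hD | hD
            · exact inv.cs_one D hD p hp
            · rw [List.mem_singleton.mp hD] at hp
              exact reachR_one honeland ((mem_ReachF_of_one honeland).mp hp)
          · -- cs_closed
            intro D hD p hp qq hstep
            rcases List.mem_append.mp hD with hD | hD
            · exact inv.cs_closed D hD p hp qq hstep
            · rw [List.mem_singleton.mp hD] at hp ⊢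
              exact (mem_ReachF_of_one honeland).mpr
                (((mem_ReachF_of_one honeland).mp hp).tail hstep)
        obtain ⟨CS', hinv'⟩ := ih (fun p hp => hcells p (by simp [hp])) gf
          (PySem.Dict.insert dict blob ((ReachF g n m (i, j)).card : Int)) (blob + 1)
          (comps ++ [comp]) (PySem.Set.union covered comp) (CS ++ [C]) hnew
        exact ⟨CS', by
          simpa only [hbfs1, hbfs2] using hinv'⟩
      · -- a 0-cell (or ≤ 0): both sides skip
        rw [if_neg (by simpa using hval_eq.trans_ne hone), if_pos (by simp [hone])]
        exact ih (fun p hp => hcells p (by simp [hp])) g dict blob comps covered CS inv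

-- ===== the column scan =====
def colSum (CS : List (Finset (Int × Int))) (col : Int) : Int :=
  ∑ k ∈ (Finset.range CS.length).filter (fun k => ∃ p ∈ CS.getD k ∅, p.2 = col),
    ((CS.getD k ∅).card : Int)

lemma uniq_fold_mem {g : List (List Int)} {col : Int} :
    ∀ (rows : List Int) (u0 : PySem.Set Int) (x : Int),
    (x ∈ rows.foldl (fun u row =>
        if pvGet g row col > 1 then PySem.Set.add u (pvGet g row col) else u) u0) ↔
    x ∈ u0 ∨ ∃ row ∈ rows, pvGet g row col > 1 ∧ x = pvGet g row col := by
  intro rows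
  induction rows with
  | nil => simp
  | cons r rs ih =>
    intro u0 x
    rw [List.foldl_cons]
    split_ifs with hr
    · rw [ih]
      simp only [PySem.Set.mem_add, List.mem_cons]
      constructor
      · rintro ((hx | rfl) | ⟨row, hrow, hgt, rfl⟩)
        · exact Or.inl hx
        · exact Or.inr ⟨r, Or.inl rfl, hr, rfl⟩
        · exact Or.inr ⟨row, Or.inr hrow, hgt, rfl⟩
      · rintro (hx | ⟨row, (rfl | hrow), hgt, rfl⟩)
        · exact Or.inl (Or.inl hx)
        · exact Or.inl (Or.inr rfl)
        · exact Or.inr ⟨row, hrow, hgt, rfl⟩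
    · rw [ih]
      simp only [List.mem_cons]
      constructor
      · rintro (hx | ⟨row, hrow, hgt, rfl⟩)
        · exact Or.inl hx
        · exact Or.inr ⟨row, Or.inr hrow, hgt, rfl⟩
      · rintro (hx | ⟨row, (rfl | hrow), hgt, rfl⟩)
        · exact Or.inl hx
        · exact absurd hgt hr
        · exact Or.inr ⟨row, hrow, hgt, rfl⟩

lemma uniq_fold_nodup {g : List (List Int)} {col : Int} :
    ∀ (rows : List Int) (u0 : PySem.Set Int), u0.Nodup →
    (rows.foldl (fun u row =>
        if pvGet g row col > 1 then PySem.Set.add u (pvGet g row col) else u) u0).Nodup := by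
  intro rows
  induction rows with
  | nil => exact fun u0 h => h
  | cons r rs ih =>
    intro u0 h0
    rw [List.foldl_cons]
    split_ifs with hr
    · exact ih _ (PySem.Set.nodup_add _ _ h0)
    · exact ih _ h0

lemma colA_eq {land g : List (List Int)} {n m : Int} {dict : PySem.Dict Int Int}
    {CS : List (Finset (Int × Int))}
    (labeled : ∀ k : ℕ, k < CS.length → ∀ p ∈ CS.getD k ∅, pvGet g p.1 p.2 = 2 + (k : Int))
    (unlabeled : ∀ p : Int × Int, 0 ≤ p.1 → 0 ≤ p.2 → ¬ CellsU CS p →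
      pvGet g p.1 p.2 = pvGet land p.1 p.2)
    (dictv : ∀ j : ℕ, j < CS.length →
      PySem.Dict.getD dict (2 + (j : Int)) 0 = ((CS.getD j ∅).card : Int))
    (cs_one : ∀ C ∈ CS, ∀ p ∈ C, OneC land n m p)
    (hle1 : ∀ p : Int × Int, InGrid n m p → pvGet land p.1 p.2 ≤ 1)
    {col : Int} (hc0 : 0 ≤ col) (hcm : col < m) :
    (((PySem.List.pyRange 0 n 1).foldl (fun u row =>
        if pvGet g row col > 1 then PySem.Set.add u (pvGet g row col) else u)
        (PySem.Set.empty : PySem.Set Int)).map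
      (fun b => PySem.Dict.getD dict b 0)).sum = colSum CS col := by
  classical
  set uniq := (PySem.List.pyRange 0 n 1).foldl (fun u row =>
      if pvGet g row col > 1 then PySem.Set.add u (pvGet g row col) else u)
      (PySem.Set.empty : PySem.Set Int) with huniq
  have hnodup : uniq.Nodup := uniq_fold_nodup _ _ (by simp [PySem.Set.empty])
  have hmem : ∀ x, x ∈ uniq ↔
      ∃ k ∈ (Finset.range CS.length).filter (fun k => ∃ p ∈ CS.getD k ∅, p.2 = col),
        x = 2 + (k : Int) := by
    intro x
    rw [huniq, uniq_fold_mem]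
    simp only [PySem.Set.empty, List.not_mem_nil, false_or]
    constructor
    · rintro ⟨row, hrow, hgt, rfl⟩
      rw [PySem.List.mem_pyRange_one] at hrow
      have hgrid : InGrid n m (row, col) := ⟨hrow.1, hrow.2, hc0, hcm⟩
      have hcu : CellsU CS (row, col) := by
        by_contra hnc
        have := unlabeled (row, col) hrow.1 hc0 hnc
        have hland := hle1 (row, col) hgrid
        simp only at this hland
        omega
      obtain ⟨C, hC, hpC⟩ := hcu
      obtain ⟨k, hk, rfl⟩ := (mem_iff_getD CS C ∅).mp hC
      refine ⟨k, Finset.mem_filter.mpr ⟨Finset.mem_range.mpr hk, ⟨(row, col), hpC, rfl⟩⟩, ?_⟩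
      have := labeled k hk (row, col) hpC
      simp only at this
      omega
    · rintro ⟨k, hk, rfl⟩
      obtain ⟨hkr, p, hpC, hpcol⟩ := Finset.mem_filter.mp hk
      rw [Finset.mem_range] at hkr
      have hmemCS : CS.getD k ∅ ∈ CS := (mem_iff_getD CS _ ∅).mpr ⟨k, hkr, rfl⟩
      have hone := cs_one _ hmemCS p hpC
      refine ⟨p.1, PySem.List.mem_pyRange_one.mpr ⟨hone.1.1, hone.1.2.1⟩, ?_, ?_⟩
      · have := labeled k hkr p hpC
        rw [← hpcol]
        omega
      · have := labeled k hkr p hpC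
        rw [← hpcol]
        omega
  have htofin : uniq.toFinset
      = ((Finset.range CS.length).filter (fun k => ∃ p ∈ CS.getD k ∅, p.2 = col)).image
          (fun k : ℕ => 2 + (k : Int)) := by
    apply Finset.ext
    intro x
    rw [List.mem_toFinset, hmem x]
    constructor
    · rintro ⟨k, hk, rfl⟩
      exact Finset.mem_image.mpr ⟨k, hk, rfl⟩
    · intro hx
      obtain ⟨k, hk, hkx⟩ := Finset.mem_image.mp hx
      exact ⟨k, hk, hkx.symm⟩
  have hsum : (uniq.map (fun b => PySem.Dict.getD dict b 0)).sum
      = ∑ x ∈ uniq.toFinset, PySem.Dict.getD dict x 0 := by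
    rw [List.sum_toFinset _ hnodup]
  have himg := Finset.sum_image
    (s := (Finset.range CS.length).filter (fun k => ∃ p ∈ CS.getD k ∅, p.2 = col))
    (f := fun b => PySem.Dict.getD dict b 0)
    (g := fun k : ℕ => 2 + (k : Int))
    (by intro a _ b _ hab; simp only at hab; omega)
  rw [hsum, htofin, himg]
  unfold colSum
  apply Finset.sum_congr rfl
  intro k hk
  exact dictv k (Finset.mem_range.mp (Finset.mem_filter.mp hk).1)

lemma foldl_if_add_indexed (cs : List (PySem.Set (Int × Int)))
    (P : PySem.Set (Int × Int) → Bool) (f : PySem.Set (Int × Int) → Int) (init : Int) :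
    cs.foldl (fun t c => if P c then t + f c else t) init
      = init + ∑ k ∈ (Finset.range cs.length).filter (fun k => P (cs.getD k []) = true),
          f (cs.getD k []) := by
  classical
  induction cs using List.reverseRecOn generalizing init with
  | nil => simp
  | append_singleton cs c ih =>
    rw [List.foldl_append, List.foldl_cons, List.foldl_nil, ih]
    have hlen : (cs ++ [c]).length = cs.length + 1 := by simp
    rw [hlen, Finset.range_add_one, Finset.filter_insert]
    have hnotmem : cs.length ∉ (Finset.range cs.length).filter
        (fun k => P ((cs ++ [c]).getD k []) = true) := by
      simp
    have hfilter : (Finset.range cs.length).filter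
        (fun k => P ((cs ++ [c]).getD k []) = true)
        = (Finset.range cs.length).filter (fun k => P (cs.getD k []) = true) := by
      apply Finset.filter_congr
      intro k hk
      rw [getD_append_lt _ _ _ _ (Finset.mem_range.mp hk)]
    have hsumcongr : ∀ (S : Finset ℕ), (∀ k ∈ S, k < cs.length) →
        ∑ k ∈ S, f ((cs ++ [c]).getD k []) = ∑ k ∈ S, f (cs.getD k []) := by
      intro S hS
      apply Finset.sum_congr rfl
      intro k hk
      rw [getD_append_lt _ _ _ _ (hS k hk)]
    rw [getD_append_len]
    split_ifs with hPc
    · rw [Finset.sum_insert (by rw [hfilter] at hnotmem ⊢; exact hnotmem)]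
      rw [getD_append_len, hfilter,
        hsumcongr _ (fun k hk => Finset.mem_range.mp (Finset.mem_filter.mp hk).1)]
      ring
    · rw [hfilter,
        hsumcongr _ (fun k hk => Finset.mem_range.mp (Finset.mem_filter.mp hk).1)]

lemma colB_eq {comps : List (PySem.Set (Int × Int))} {CS : List (Finset (Int × Int))}
    (comps_len : comps.length = CS.length)
    (comps_nodup : ∀ k : ℕ, k < CS.length → (comps.getD k []).Nodup)
    (comps_mem : ∀ k : ℕ, k < CS.length → ∀ p, p ∈ comps.getD k [] ↔ p ∈ CS.getD k ∅)
    {col : Int} :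
    comps.foldl (fun t comp =>
      if comp.any (fun p => p.2 == col) then t + PySem.Set.len comp else t) 0
    = colSum CS col := by
  classical
  rw [foldl_if_add_indexed]
  unfold colSum
  rw [comps_len]
  have hfilter : (Finset.range CS.length).filter
      (fun k => (comps.getD k []).any (fun p => p.2 == col) = true)
      = (Finset.range CS.length).filter (fun k => ∃ p ∈ CS.getD k ∅, p.2 = col) := by
    apply Finset.filter_congr
    intro k hk
    rw [Finset.mem_range] at hk
    simp only [List.any_eq_true, beq_iff_eq]
    constructor
    · rintro ⟨p, hp, hcol⟩
      exact ⟨p, (comps_mem k hk p).mp hp, hcol⟩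
    · rintro ⟨p, hp, hcol⟩
      exact ⟨p, (comps_mem k hk p).mpr hp, hcol⟩
  rw [hfilter]
  have : ∀ k ∈ (Finset.range CS.length).filter (fun k => ∃ p ∈ CS.getD k ∅, p.2 = col),
      PySem.Set.len (comps.getD k []) = ((CS.getD k ∅).card : Int) := by
    intro k hk
    have hklt : k < CS.length := Finset.mem_range.mp (Finset.mem_filter.mp hk).1
    have htf : (comps.getD k []).toFinset = CS.getD k ∅ := by
      apply Finset.ext
      intro p
      rw [List.mem_toFinset]
      exact comps_mem k hklt p
    unfold PySem.Set.len
    rw [← htf, List.toFinset_card_of_nodup (comps_nodup k hklt)]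
  rw [Finset.sum_congr rfl this]
  ring

-- ===== VERDICT (by name: the statement is the Claim_ definition above) =====
lemma pre_facts {land : List (List Int)} (hpre : Pre_solution land) :
    (land.length = ((land.length : Int)).toNat) ∧
    (∀ k : ℕ, k < land.length →
      (((PySem.List.pyGetD land 0 []).length : Int)).toNat ≤ (land.getD k []).length) ∧
    (∀ p : Int × Int, InGrid (land.length : Int) ((PySem.List.pyGetD land 0 []).length : Int) p →
      pvGet land p.1 p.2 ≤ 1) := by
  obtain ⟨hne, hrows⟩ := hpre
  refine ⟨by simp, ?_, ?_⟩
  · intro k hk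
    have hmem : land.getD k [] ∈ land := by
      rw [List.getD_eq_getElem?_getD, List.getElem?_eq_getElem hk]
      exact List.getElem_mem hk
    simpa using (hrows _ hmem).1
  · rintro ⟨i, j⟩ ⟨h1, h2, h3, h4⟩
    simp only at h1 h2 h3 h4 ⊢
    set M := (PySem.List.pyGetD land 0 []).length with hM
    rw [pvGet_nonneg h1 h3]
    have hilt : i.toNat < land.length := by omega
    have hrow_mem : land.getD i.toNat [] ∈ land := by
      rw [List.getD_eq_getElem?_getD, List.getElem?_eq_getElem hilt]
      exact List.getElem_mem hilt
    obtain ⟨hlen, hval⟩ := hrows _ hrow_mem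
    have hjlt : j.toNat < M := by omega
    have hjrow : j.toNat < (land.getD i.toNat []).length := by omega
    rw [List.getD_eq_getElem?_getD, List.getElem?_eq_getElem hjrow]
    simp only [Option.getD_some]
    have hlt : ((land.getD i.toNat []).take M).length = M := by
      rw [List.length_take]; omega
    have hjtake : j.toNat < ((land.getD i.toNat []).take M).length := by omega
    have hmem2 : (land.getD i.toNat [])[j.toNat]'hjrow ∈ (land.getD i.toNat []).take M := by
      have h := List.getElem_mem hjtake
      rwa [List.getElem_take] at h
    exact hval _ hmem2

theorem solution_spec : Claim_equal_solution := by
  intro land hdom hpre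
  unfold Spec_solution
  obtain ⟨hn, hrowm, hle1⟩ := pre_facts hpre
  set nI : Int := (land.length : Int) with hnI
  set mI : Int := ((PySem.List.pyGetD land 0 []).length : Int) with hmI
  set cells : List (Int × Int) :=
    (PySem.List.pyRange 0 nI 1).flatMap
      (fun i => (PySem.List.pyRange 0 mI 1).map (fun j => (i, j))) with hcells_def
  have hcells : ∀ p ∈ cells, InGrid nI mI p := by
    intro p hp
    rw [hcells_def, List.mem_flatMap] at hp
    obtain ⟨i, hi, hp⟩ := hp
    rw [List.mem_map] at hp
    obtain ⟨j, hj, rfl⟩ := hp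
    rw [PySem.List.mem_pyRange_one] at hi hj
    exact ⟨hi.1, hi.2, hj.1, hj.2⟩
  have inv0 : OuterInv land nI mI land (PySem.Dict.empty : PySem.Dict Int Int) 2 [] PySem.Set.empty [] := by
    constructor
    · rfl
    · intro k; rfl
    · intro k hk; simp at hk
    · intro p _ _ _; rfl
    · intro j hj; simp at hj
    · simp
    · rfl
    · intro k hk; simp at hk
    · intro k hk; simp at hk
    · simp [PySem.Set.empty]
    · intro p; simp [PySem.Set.empty, CellsU]
    · intro C hC; simp at hC
    · intro C hC; simp at hC
  obtain ⟨CS', hinv⟩ := outer_fold_spec hn hrowm hle1 cells hcells land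
    (PySem.Dict.empty : PySem.Dict Int Int) 2 [] PySem.Set.empty [] inv0
  show solution land = solution_alt land
  have hA : solution land = (PySem.List.pyRange 0 mI 1).foldl (fun maxOil col =>
      let uniq := (PySem.List.pyRange 0 nI 1).foldl (fun u row =>
        if pvGet (cells.foldl (fun st (q : Int × Int) =>
          if pvGet st.1 q.1 q.2 = 1 then
            let r := pvBfs nI mI st.1 q.1 q.2 st.2.2
            (r.1, PySem.Dict.insert st.2.1 st.2.2 r.2, st.2.2 + 1)
          else st) (land, (PySem.Dict.empty : PySem.Dict Int Int), (2 : Int))).1 row col > 1 then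
          PySem.Set.add u (pvGet (cells.foldl (fun st (q : Int × Int) =>
          if pvGet st.1 q.1 q.2 = 1 then
            let r := pvBfs nI mI st.1 q.1 q.2 st.2.2
            (r.1, PySem.Dict.insert st.2.1 st.2.2 r.2, st.2.2 + 1)
          else st) (land, (PySem.Dict.empty : PySem.Dict Int Int), (2 : Int))).1 row col) else u)
        (PySem.Set.empty : PySem.Set Int)
      let total := (uniq.map (fun b => PySem.Dict.getD (cells.foldl (fun st (q : Int × Int) =>
          if pvGet st.1 q.1 q.2 = 1 then
            let r := pvBfs nI mI st.1 q.1 q.2 st.2.2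
            (r.1, PySem.Dict.insert st.2.1 st.2.2 r.2, st.2.2 + 1)
          else st) (land, (PySem.Dict.empty : PySem.Dict Int Int), (2 : Int))).2.1 b 0)).sum
      max maxOil total) 0 := by
    unfold solution
    dsimp only
    rw [← hnI, ← hmI]
    rw [foldl_flatMap_pairs (f := fun st i j =>
      if pvGet st.1 i j = 1 then
        let r := pvBfs nI mI st.1 i j st.2.2
        (r.1, PySem.Dict.insert st.2.1 st.2.2 r.2, st.2.2 + 1)
      else st)]
  have hB : solution_alt land = (PySem.List.pyRange 0 mI 1).foldl (fun best col =>
      let total := (cells.foldl (fun st (q : Int × Int) =>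
          if pvGet land q.1 q.2 ≠ 1 ∨ (q.1, q.2) ∈ st.2 then st
          else
            let comp := growLoop land nI mI (nI.toNat * mI.toNat) (PySem.Set.ofList [(q.1, q.2)])
            (st.1 ++ [comp], PySem.Set.union st.2 comp))
          (([] : List (PySem.Set (Int × Int))), (PySem.Set.empty : PySem.Set (Int × Int)))).1.foldl
        (fun t comp => if comp.any (fun p => p.2 == col) then t + PySem.Set.len comp else t) 0
      max best total) 0 := by
    unfold solution_alt
    dsimp only
    rw [← hnI, ← hmI]
    rw [foldl_flatMap_pairs (f := fun st i j =>
      if pvGet land i j ≠ 1 ∨ (i, j) ∈ st.2 then st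
      else
        let comp := growLoop land nI mI (nI.toNat * mI.toNat) (PySem.Set.ofList [(i, j)])
        (st.1 ++ [comp], PySem.Set.union st.2 comp))]
  rw [hA, hB]
  apply PySem.List.foldl_congr_mem
  intro acc col hcol
  rw [PySem.List.mem_pyRange_one] at hcol
  simp only
  rw [colA_eq hinv.labeled hinv.unlabeled hinv.dictv hinv.cs_one hle1 hcol.1 hcol.2,
    colB_eq hinv.comps_len hinv.comps_nodup hinv.comps_mem]
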